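-- pv_equiv track=rewrite | github.com/fajiel/news_sentiment | main.py | sen_title_count
-- ===== SOURCE A (Python) =====
-- def sen_title_count(title_list, sentence_words_list):
--     sen_title_list = []
--     for sentence_list in sentence_words_list:
--         word_count = 0
--         for word in title_list:
--             word_count += sentence_list.count(word)
--         sen_title_list.append(word_count)
--     return sen_title_list
-- ===== SOURCE B (Python) =====
-- from collections import Counter
--
-- def sen_title_count(title_list, sentence_words_list):
--     # Inverted counting: sum over SENTENCE words of the title's multiplicity of
--     # that word, instead of summing over title words their count in the sentence.
--     # Correct by double counting: both sums count the matching (title, word) pairs.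
--     title_mult = Counter(title_list)
--     return [sum(title_mult[w] for w in sentence) for sentence in sentence_words_list]
-- ===== Notes on version B (the rewrite author's own statement) =====
-- stated objective: faster
-- what changed: Inverts the counting direction: builds a multiplicity map of the title once and, for each sentence, sums the title-multiplicity of each sentence word (double-counting identity), instead of scanning the sentence once per title word.
import Mathlib
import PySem

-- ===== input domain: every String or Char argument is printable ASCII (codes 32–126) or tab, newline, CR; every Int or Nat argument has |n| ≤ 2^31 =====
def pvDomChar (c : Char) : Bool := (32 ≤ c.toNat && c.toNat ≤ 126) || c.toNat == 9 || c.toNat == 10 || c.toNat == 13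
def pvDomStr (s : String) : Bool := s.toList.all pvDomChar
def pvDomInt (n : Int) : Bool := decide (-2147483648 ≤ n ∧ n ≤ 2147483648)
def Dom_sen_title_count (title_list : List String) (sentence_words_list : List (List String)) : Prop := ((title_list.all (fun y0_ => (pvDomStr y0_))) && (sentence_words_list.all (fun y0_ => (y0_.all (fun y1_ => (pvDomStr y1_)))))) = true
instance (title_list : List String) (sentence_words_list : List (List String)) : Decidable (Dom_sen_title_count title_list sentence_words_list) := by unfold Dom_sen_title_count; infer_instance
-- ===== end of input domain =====

-- B inverts the counting direction: one multiplicity map of the title, summed over sentence words.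

-- ===== PORT A =====
def sen_title_count (title_list : List String) (sentence_words_list : List (List String)) : List Int :=
  sentence_words_list.foldl (fun sen_title_list sentence_list =>
    sen_title_list ++ [title_list.foldl
      (fun word_count word => word_count + (PySem.List.count sentence_list word : Int)) 0]) []

-- ===== PORT B =====
def sen_title_count_alt (title_list : List String) (sentence_words_list : List (List String)) : List Int :=
  let title_mult := PySem.Dict.counter title_list
  sentence_words_list.map (fun sentence =>
    (sentence.map (fun w => title_mult.getD w 0)).sum)

-- ===== PRECONDITION & SPEC =====
def Spec_sen_title_count (title_list : List String) (sentence_words_list : List (List String)) (out : List Int) : Prop := out = sen_title_count_alt title_list sentence_words_list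
instance (title_list : List String) (sentence_words_list : List (List String)) (out : List Int) : Decidable (Spec_sen_title_count title_list sentence_words_list out) := by unfold Spec_sen_title_count; infer_instance

-- ===== CLAIM =====
def Claim_equal_sen_title_count : Prop := ∀ (title_list : List String) (sentence_words_list : List (List String)), Dom_sen_title_count title_list sentence_words_list → Spec_sen_title_count title_list sentence_words_list (sen_title_count title_list sentence_words_list)

-- ===== LEMMAS AND PROOFS =====

-- Double-counting identity: summing counts of title words in the sentence equals
-- summing, over sentence words, their multiplicity in the title.
theorem foldl_count_swap (title_list sen : List String) (a : Int) :
    title_list.foldl (fun word_count word => word_count + (PySem.List.count sen word : Int)) a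
      = a + (sen.map (fun w => (List.count w title_list : Int))).sum := by
  induction title_list generalizing a with
  | nil => simp
  | cons t ts ih =>
    rw [List.foldl_cons, ih]
    have hmap : sen.map (fun w => (List.count w (t :: ts) : Int))
        = sen.map (fun w => (List.count w ts : Int) + if t == w then 1 else 0) := by
      refine List.map_congr_left (fun w _ => ?_)
      rw [List.count_cons]; push_cast; ring
    rw [hmap, PySem.List.sum_map_add_int sen (fun w => (List.count w ts : Int)) (fun w => if t == w then 1 else 0),
      PySem.List.sum_map_ite_one_zero (fun w => t == w) sen]
    have hc : List.countP (fun w => t == w) sen = List.count t sen := by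
      rw [List.count_eq_countP]
      refine List.countP_congr (fun x _ => ?_)
      constructor <;> intro h <;> exact beq_iff_eq.mpr (beq_iff_eq.mp h).symm
    rw [hc, PySem.List.count_eq]
    ring

-- ===== VERDICT =====
theorem sen_title_count_spec : Claim_equal_sen_title_count := by
  intro title_list sentence_words_list _
  show _ = _
  unfold sen_title_count sen_title_count_alt
  rw [PySem.List.foldl_append_singleton_eq_map]
  simp only [List.nil_append]
  refine List.map_congr_left (fun sen _ => ?_)
  rw [foldl_count_swap title_list sen 0]
  simp [PySem.Dict.getD_counter]
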